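-- pv_equiv track=rewrite | github.com/lihong0416/server_dianhan_project | sputils/data_utils.py | get_range_index
-- ===== SOURCE A (Python) =====
-- def get_range_index(now, range_max, width=10):
--     def sort_weight(item):
--         return item[1]
--
--     result = []
--     min = now - width if now - width >= 0 else 0
--     max = now + width if now + width < range_max else range_max - 1
--
--     for this_i in range(min, max + 1, 1):
--         weight = abs(this_i - now)
--
--         result.append([this_i, weight])
--     result.sort(key=sort_weight)
--     return result
-- ===== SOURCE B (Python) =====
-- def get_range_index(now, range_max, width=10):
--     # Two-pointer: repeatedly take the endpoint farther from `now` (ties: the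
--     # right one, matching the stable sort), building the result back-to-front.
--     lo = now - width if now - width >= 0 else 0
--     hi = now + width if now + width < range_max else range_max - 1
--     out = []
--     while lo <= hi:
--         if now - lo > hi - now:
--             out.append([lo, abs(lo - now)])
--             lo += 1
--         else:
--             out.append([hi, abs(hi - now)])
--             hi -= 1
--     out.reverse()
--     return out
-- ===== Notes on version B (the rewrite author's own statement) =====
-- stated objective: alternative
-- what changed: Replaces build-the-window-then-stable-sort-by-distance with a two-pointer scan that repeatedly takes the window endpoint farther from `now` (ties: the right endpoint, matching sort stability), building the result back-to-front without any sort.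
import Mathlib
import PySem

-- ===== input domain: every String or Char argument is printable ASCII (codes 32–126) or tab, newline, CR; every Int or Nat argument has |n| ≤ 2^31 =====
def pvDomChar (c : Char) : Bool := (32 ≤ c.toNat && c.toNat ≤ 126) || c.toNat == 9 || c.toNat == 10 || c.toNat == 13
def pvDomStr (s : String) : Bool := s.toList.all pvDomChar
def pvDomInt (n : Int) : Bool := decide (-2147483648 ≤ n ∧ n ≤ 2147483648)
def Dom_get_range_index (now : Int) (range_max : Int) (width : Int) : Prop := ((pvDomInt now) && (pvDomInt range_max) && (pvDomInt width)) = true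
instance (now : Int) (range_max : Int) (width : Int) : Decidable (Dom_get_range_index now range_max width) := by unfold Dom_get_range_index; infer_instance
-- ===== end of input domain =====

-- B replaces the build-then-sort of A by a two-pointer scan that repeatedly takes the
-- endpoint farther from `now` (ties take the right one, matching the stable sort),
-- building the result back-to-front, with no sort (objective: alternative algorithm).

-- ===== PORT A =====
-- literal port of A: build [[i, |i-now|] for i in range(min, max+1)] then stable-sort by item[1]
-- (key item[1] is ported with pyGetD; every item built has length 2, so the default is never used)
def get_range_index (now : Int) (range_max : Int) (width : Int) : List (List Int) :=
  let mn : Int := if now - width ≥ 0 then now - width else 0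
  let mx : Int := if now + width < range_max then now + width else range_max - 1
  let result : List (List Int) :=
    (PySem.List.pyRange mn (mx + 1) 1).foldl (fun acc i => acc ++ [[i, |i - now|]]) []
  PySem.List.sorted result (fun item => PySem.List.pyGetD item 1 0)

-- ===== PORT B =====
-- the while-loop of Source B; Python appends the farther endpoint and reverses at the end,
-- which is ported as consing onto the accumulator (append-then-reverse = fold with cons)
def grGo (now : Int) (lo : Int) (hi : Int) (acc : List (List Int)) : List (List Int) :=
  if lo ≤ hi then
    if now - lo > hi - now then grGo now (lo + 1) hi ([lo, |lo - now|] :: acc)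
    else grGo now lo (hi - 1) ([hi, |hi - now|] :: acc)
  else acc
termination_by (hi + 1 - lo).toNat
decreasing_by all_goals omega

def get_range_index_alt (now : Int) (range_max : Int) (width : Int) : List (List Int) :=
  let lo : Int := if now - width ≥ 0 then now - width else 0
  let hi : Int := if now + width < range_max then now + width else range_max - 1
  grGo now lo hi []

-- ===== PRECONDITION & SPEC =====
def Spec_get_range_index (now : Int) (range_max : Int) (width : Int) (out : List (List Int)) : Prop := out = get_range_index_alt now range_max width
instance (now : Int) (range_max : Int) (width : Int) (out : List (List Int)) : Decidable (Spec_get_range_index now range_max width out) := by unfold Spec_get_range_index; infer_instance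

-- ===== CLAIM (what is proved, stated in full; the proofs are below) =====
def Claim_equal_get_range_index : Prop := ∀ (now : Int) (range_max : Int) (width : Int), Dom_get_range_index now range_max width → Spec_get_range_index now range_max width (get_range_index now range_max width)

-- ===== LEMMAS AND PROOFS =====

-- the common description: the window sorted by distance from `now`, defined by peeling
-- the farther endpoint (ties: the right endpoint) to the back of the list
def grF (now : Int) (lo : Int) (hi : Int) : List (List Int) :=
  if lo ≤ hi then
    if now - lo > hi - now then grF now (lo + 1) hi ++ [[lo, |lo - now|]]
    else grF now lo (hi - 1) ++ [[hi, |hi - now|]]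
  else []
termination_by (hi + 1 - lo).toNat
decreasing_by all_goals omega

theorem grF_nil (now lo hi : Int) (h : ¬ lo ≤ hi) : grF now lo hi = [] := by
  conv_lhs => rw [grF]
  rw [if_neg h]

theorem grF_peel_lo (now lo hi : Int) (h1 : lo ≤ hi) (h2 : now - lo > hi - now) :
    grF now lo hi = grF now (lo + 1) hi ++ [[lo, |lo - now|]] := by
  conv_lhs => rw [grF]
  rw [if_pos h1, if_pos h2]

theorem grF_peel_hi (now lo hi : Int) (h1 : lo ≤ hi) (h2 : ¬ now - lo > hi - now) :
    grF now lo hi = grF now lo (hi - 1) ++ [[hi, |hi - now|]] := by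
  conv_lhs => rw [grF]
  rw [if_pos h1, if_neg h2]

theorem grGo_eq_grF (now lo hi : Int) (acc : List (List Int)) :
    grGo now lo hi acc = grF now lo hi ++ acc := by
  fun_induction grGo now lo hi acc with
  | case1 lo hi acc h1 h2 ih => rw [grF_peel_lo now lo hi h1 h2, ih]; simp
  | case2 lo hi acc h1 h2 ih => rw [grF_peel_hi now lo hi h1 h2, ih]; simp
  | case3 lo hi acc h1 => rw [grF_nil now lo hi h1]; simp

theorem mem_grF (now lo hi : Int) (y : List Int) (hy : y ∈ grF now lo hi) :
    ∃ i : Int, lo ≤ i ∧ i ≤ hi ∧ y = [i, |i - now|] := by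
  fun_induction grF now lo hi with
  | case1 lo hi h1 h2 ih =>
    rcases List.mem_append.1 hy with h | h
    · obtain ⟨i, hi1, hi2, hi3⟩ := ih h; exact ⟨i, by omega, hi2, hi3⟩
    · exact ⟨lo, le_refl _, h1, by simpa using h⟩
  | case2 lo hi h1 h2 ih =>
    rcases List.mem_append.1 hy with h | h
    · obtain ⟨i, hi1, hi2, hi3⟩ := ih h; exact ⟨i, hi1, by omega, hi3⟩
    · exact ⟨hi, h1, le_refl _, by simpa using h⟩
  | case3 lo hi h1 => simp at hy

theorem insertBy_append_of_before {α : Type} (before : α → α → Bool) (x z : α)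
    (ys zs : List α) (h : before x z = true) :
    PySem.List.insertBy before x (ys ++ z :: zs) =
      PySem.List.insertBy before x ys ++ z :: zs := by
  induction ys with
  | nil => rw [PySem.List.insertBy.eq_1]; simp [PySem.List.insertBy.eq_2, h]
  | cons y ys ih =>
    rw [List.cons_append, PySem.List.insertBy.eq_2, PySem.List.insertBy.eq_2]
    by_cases hb : before x y = true
    · simp [hb]
    · simp only [Bool.not_eq_true] at hb; simp [hb, ih]

theorem pyGetD_pair (i d : Int) : PySem.List.pyGetD [i, d] 1 0 = d := by
  simp [PySem.List.pyGetD]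

-- inserting the element for index j into the sorted window [lo, j-1] yields the window [lo, j]
theorem insert_step (n : Nat) : ∀ (now lo j : Int), (j - lo).toNat = n → lo ≤ j →
    PySem.List.insertBy
      (fun a b => decide (PySem.List.pyGetD a 1 0 < PySem.List.pyGetD b 1 0))
      [j, |j - now|] (grF now lo (j - 1)) = grF now lo j := by
  induction n with
  | zero =>
    intro now lo j hn hle
    have hlo : lo = j := by omega
    subst hlo
    rw [grF_nil now lo (lo - 1) (by omega), PySem.List.insertBy.eq_1]
    by_cases hc : now - lo > lo - now
    · rw [grF_peel_lo now lo lo (le_refl _) hc, grF_nil now (lo + 1) lo (by omega)]; simp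
    · rw [grF_peel_hi now lo lo (le_refl _) hc, grF_nil now lo (lo - 1) (by omega)]; simp
  | succ m ih =>
    intro now lo j hn hle
    have hlj : lo < j := by omega
    by_cases hc : now - lo > j - now
    · -- lo is the farther endpoint in both windows
      rw [grF_peel_lo now lo (j - 1) (by omega) (by omega)]
      have hb : (fun a b => decide (PySem.List.pyGetD a 1 0 < PySem.List.pyGetD b 1 0))
          ([j, |j - now|]) ([lo, |lo - now|]) = true := by
        simp only [pyGetD_pair, decide_eq_true_eq]
        rcases abs_cases (j - now) with ⟨h1, h2⟩ | ⟨h1, h2⟩ <;>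
          rcases abs_cases (lo - now) with ⟨h3, h4⟩ | ⟨h3, h4⟩ <;> omega
      rw [insertBy_append_of_before _ _ _ _ _ hb,
          ih now (lo + 1) j (by omega) (by omega),
          ← grF_peel_lo now lo j (by omega) hc]
    · -- j is the farther endpoint (or tied): it goes to the back
      have hnj : now ≤ j := by omega
      rw [grF_peel_hi now lo j (by omega) hc]
      apply PySem.List.insertBy_of_forall_not_before
      intro y hy
      obtain ⟨i, h1, h2, h3⟩ := mem_grF now lo (j - 1) y hy
      subst h3
      simp only [pyGetD_pair, decide_eq_false_iff_not, not_lt]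
      rcases abs_cases (i - now) with ⟨h4, h5⟩ | ⟨h4, h5⟩ <;>
        rcases abs_cases (j - now) with ⟨h6, h7⟩ | ⟨h6, h7⟩ <;> omega

-- A's sorted window equals the peel-the-farther-endpoint description
theorem sorted_eq_grF (now lo : Int) (n : Nat) :
    PySem.List.sorted ((PySem.List.pyRange lo (lo + n) 1).map (fun i => [i, |i - now|]))
      (fun item => PySem.List.pyGetD item 1 0) = grF now lo (lo + n - 1) := by
  induction n with
  | zero =>
    rw [PySem.List.pyRange_one_eq_nil (by omega), grF_nil now lo (lo + (0 : Nat) - 1) (by omega)]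
    rfl
  | succ m ih =>
    have e0 : lo + ((m + 1 : Nat) : Int) = (lo + m) + 1 := by push_cast; ring
    rw [e0, PySem.List.pyRange_one_succ_right (by omega), List.map_append,
        PySem.List.sorted_eq_foldl_insertBy, List.foldl_append,
        ← PySem.List.sorted_eq_foldl_insertBy]
    simp only [List.map_cons, List.map_nil, List.foldl_cons, List.foldl_nil]
    rw [ih]
    have e1 : lo + (m : Int) + 1 - 1 = lo + (m : Int) := by ring
    rw [e1, insert_step (lo + (m : Int) - lo).toNat now lo (lo + (m : Int)) rfl (by omega)]

-- ===== VERDICT (by name: the statement is the Claim_ definition above) =====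
theorem get_range_index_spec : Claim_equal_get_range_index := by
  intro now range_max width _
  unfold Spec_get_range_index get_range_index get_range_index_alt
  set mn : Int := if now - width ≥ 0 then now - width else 0 with hmn
  set mx : Int := if now + width < range_max then now + width else range_max - 1 with hmx
  simp only [PySem.List.foldl_append_singleton_eq_map, List.nil_append]
  rw [grGo_eq_grF, List.append_nil]
  by_cases h : mn ≤ mx
  · have hmx' : mx + 1 = mn + ((mx + 1 - mn).toNat : Int) := by omega
    rw [hmx', sorted_eq_grF]
    congr 1
    omega
  · rw [PySem.List.pyRange_one_eq_nil (by omega), grF, if_neg h]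
    rfl
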